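-- pv_equiv track=rewrite | github.com/BikeevArtur/New | train.py | gen_trigrams
-- ===== SOURCE A (Python) =====
-- def gen_trigrams(tokens):
--     token1 = '$'
--     token2 = '$'
--     for token3 in tokens:
--         yield token1, token2, token3
--         if token3 in '.!?':
--             yield token2, token3, '$'
--             yield token3, '$', '$'
--             token1 = '$'
--             token2 = '$'
--         else:
--             token1 = token2
--             token2 = token3
-- ===== SOURCE B (Python) =====
-- def gen_trigrams(tokens):
--     # Phase 1: split tokens into sentences (terminator included as last element),
--     # flagging whether the sentence was closed by a terminator.
--     sentences = []
--     cur = []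
--     for token in tokens:
--         cur.append(token)
--         if token in '.!?':
--             sentences.append((cur, True))
--             cur = []
--     if cur:
--         sentences.append((cur, False))
--     # Phase 2: emit every consecutive triple of each padded sentence.
--     for sentence, closed in sentences:
--         padded = ['$', '$'] + sentence
--         if closed:
--             padded += ['$', '$']
--         yield from zip(padded, padded[1:], padded[2:])
-- ===== Notes on version B (the rewrite author's own statement) =====
-- stated objective: alternative
-- what changed: A interleaves padding and yielding inside one stateful loop over two sliding tokens; B first splits the tokens into terminator-closed sentences, then emits each padded sentence's consecutive triples via zip(padded, padded[1:], padded[2:]).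
import Mathlib
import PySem

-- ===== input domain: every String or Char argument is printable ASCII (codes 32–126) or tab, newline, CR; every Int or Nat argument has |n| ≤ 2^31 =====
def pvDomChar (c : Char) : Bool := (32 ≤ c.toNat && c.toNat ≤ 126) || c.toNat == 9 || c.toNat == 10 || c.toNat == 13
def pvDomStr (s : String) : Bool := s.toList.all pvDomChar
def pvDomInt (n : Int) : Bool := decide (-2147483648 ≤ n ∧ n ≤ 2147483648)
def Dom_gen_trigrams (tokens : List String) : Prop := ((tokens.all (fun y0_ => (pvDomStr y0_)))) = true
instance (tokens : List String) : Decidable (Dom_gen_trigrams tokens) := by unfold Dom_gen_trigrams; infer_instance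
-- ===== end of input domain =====

-- B restructures A's single stateful sliding-window loop into split-into-sentences then emit
-- zipped triples of each padded sentence (alternative decomposition, same cost; return value only —
-- both Pythons are generators, compared as the list of yielded triples).

-- ===== PORT A =====
-- token3 in '.!?'  (Python substring test)
def pvIsTerm (t : String) : Bool := PySem.Str.isIn t ".!?"

-- A's loop: state (token1, token2)
def pvLoopA : List String → String → String → List (String × String × String)
  | [], _, _ => []
  | t3 :: rest, t1, t2 =>
    (t1, t2, t3) ::
      (if pvIsTerm t3 then
        (t2, t3, "$") :: (t3, "$", "$") :: pvLoopA rest "$" "$"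
      else
        pvLoopA rest t2 t3)

def gen_trigrams (tokens : List String) : List (String × String × String) :=
  pvLoopA tokens "$" "$"

-- ===== PORT B =====
-- Phase 1: sentences (terminator included), flagged whether terminator-closed
def pvSplit : List String → List String → List (List String × Bool)
  | [], cur => if cur = [] then [] else [(cur, false)]
  | t :: rest, cur =>
    let cur' := cur ++ [t]
    if pvIsTerm t then (cur', true) :: pvSplit rest [] else pvSplit rest cur'

-- Phase 2: zip(padded, padded[1:], padded[2:]) — zip of the list with its two shifts
def pvEmit (s : List String × Bool) : List (String × String × String) :=
  let padded := ["$", "$"] ++ s.1 ++ (if s.2 then ["$", "$"] else [])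
  List.zipWith Prod.mk padded ((padded.drop 1).zip (padded.drop 2))

def gen_trigrams_alt (tokens : List String) : List (String × String × String) :=
  (pvSplit tokens []).flatMap pvEmit

-- ===== PRECONDITION & SPEC =====
def Spec_gen_trigrams (tokens : List String) (out : List (String × String × String)) : Prop := out = gen_trigrams_alt tokens
instance (tokens : List String) (out : List (String × String × String)) : Decidable (Spec_gen_trigrams tokens out) := by unfold Spec_gen_trigrams; infer_instance

-- ===== CLAIM (what is proved, stated in full; the proofs are below) =====
def Claim_equal_gen_trigrams : Prop := ∀ (tokens : List String), Dom_gen_trigrams tokens → Spec_gen_trigrams tokens (gen_trigrams tokens)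

-- ===== LEMMAS AND PROOFS =====

-- consecutive-triple window, the recursive reading of zip(p, p[1:], p[2:])
def pvTri : List String → List (String × String × String)
  | a :: b :: c :: rest => (a, b, c) :: pvTri (b :: c :: rest)
  | _ => []

theorem pvZip_eq_tri : ∀ l : List String,
    List.zipWith Prod.mk l ((l.drop 1).zip (l.drop 2)) = pvTri l
  | [] => rfl
  | [_] => rfl
  | [_, _] => rfl
  | a :: b :: c :: rest => by
    simpa [pvTri, List.zipWith, List.zip] using pvZip_eq_tri (b :: c :: rest)

theorem pvEmit_eq (s : List String) (b : Bool) :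
    pvEmit (s, b) = pvTri ("$" :: "$" :: (s ++ if b then ["$", "$"] else [])) := by
  simpa [pvEmit] using pvZip_eq_tri ("$" :: "$" :: (s ++ if b then ["$", "$"] else []))

-- last two elements of a :: b :: l
def pvH2 (a b : String) : List String → String × String
  | [] => (a, b)
  | c :: rest => pvH2 b c rest

theorem pvH2_append (a b : String) (l : List String) (t : String) :
    pvH2 a b (l ++ [t]) = ((pvH2 a b l).2, t) := by
  induction l generalizing a b with
  | nil => rfl
  | cons c rest ih => simpa [pvH2] using ih b c

theorem pvTri_append (a b : String) (l : List String) (t : String) :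
    pvTri (a :: b :: (l ++ [t])) =
      pvTri (a :: b :: l) ++ [((pvH2 a b l).1, (pvH2 a b l).2, t)] := by
  induction l generalizing a b with
  | nil => rfl
  | cons c rest ih => simpa [pvTri, pvH2] using ih b c

theorem pvMain (tokens : List String) : ∀ buf : List String,
    pvTri ("$" :: "$" :: buf) ++
        pvLoopA tokens (pvH2 "$" "$" buf).1 (pvH2 "$" "$" buf).2
      = (pvSplit tokens buf).flatMap pvEmit := by
  induction tokens with
  | nil =>
    intro buf
    cases buf with
    | nil => rfl
    | cons x xs => simp [pvLoopA, pvSplit, pvEmit_eq]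
  | cons t rest ih =>
    intro buf
    by_cases ht : pvIsTerm t = true
    · have e3 : pvTri ("$" :: "$" :: (buf ++ [t] ++ ["$"] ++ ["$"])) =
          pvTri ("$" :: "$" :: buf) ++
            [((pvH2 "$" "$" buf).1, (pvH2 "$" "$" buf).2, t),
             ((pvH2 "$" "$" buf).2, t, "$"), (t, "$", "$")] := by
        rw [pvTri_append, pvTri_append, pvTri_append]
        simp only [pvH2_append]
        simp
      have ih0 := ih []
      simp only [pvTri, pvH2] at ih0
      simp only [pvLoopA, pvSplit, ht, if_pos, List.flatMap_cons, pvEmit_eq]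
      rw [← ih0]
      simp only [List.nil_append] at ih0 ⊢
      rw [show buf ++ [t] ++ ["$", "$"] = buf ++ [t] ++ ["$"] ++ ["$"] by simp] at *
      rw [e3]
      simp
    · have ihb := ih (buf ++ [t])
      rw [pvTri_append, pvH2_append] at ihb
      simp only [pvLoopA, pvSplit, ht, if_neg, Bool.false_eq_true, not_false_iff]
      rw [← ihb]
      simp

-- ===== VERDICT (by name: the statement is the Claim_ definition above) =====
theorem gen_trigrams_spec : Claim_equal_gen_trigrams := by
  intro tokens _
  unfold Spec_gen_trigrams gen_trigrams gen_trigrams_alt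
  have h := pvMain tokens []
  simpa [pvTri, pvH2] using h
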